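-- pv_equiv track=rewrite | github.com/aimarsg/minerIA | asignar_clusters.py | calcular_centroide_recursivo_instancias
-- ===== SOURCE A (Python) =====
-- def calcular_centroide_recursivo_instancias(cluster, instancias, lista, instancias_fusionadas):
--     """
--     Función recursiva para obtener las instancias de los clusters
--     """
--     if cluster in lista.keys():  # Si es un índice de instancia
--         a = lista[cluster]
--         for v in a:
--             calcular_centroide_recursivo_instancias(v, instancias, lista, instancias_fusionadas)
--     else:
--         instancias_fusionadas.append(instancias[cluster])
--     return instancias_fusionadas
-- ===== SOURCE B (Python) =====
-- def calcular_centroide_recursivo_instancias(cluster, instancias, lista, instancias_fusionadas):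
--     # stage 1: collect the leaf ids of the merge tree, left to right, with an explicit stack
--     hojas = []
--     stack = [cluster]
--     while stack:
--         n = stack.pop()
--         if n in lista:
--             stack.extend(reversed(lista[n]))
--         else:
--             hojas.append(n)
--     # stage 2: map the leaf ids to their instances and extend the accumulator in place
--     instancias_fusionadas.extend(instancias[h] for h in hojas)
--     return instancias_fusionadas
-- ===== Notes on version B (the rewrite author's own statement) =====
-- stated objective: alternative
-- what changed: Recursive depth-first tree walk interleaving lookups and appends is replaced by two staged passes: an iterative explicit-stack loop that first collects the leaf ids left to right, then one pass mapping those ids to instances and extending the accumulator.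
import Mathlib
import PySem

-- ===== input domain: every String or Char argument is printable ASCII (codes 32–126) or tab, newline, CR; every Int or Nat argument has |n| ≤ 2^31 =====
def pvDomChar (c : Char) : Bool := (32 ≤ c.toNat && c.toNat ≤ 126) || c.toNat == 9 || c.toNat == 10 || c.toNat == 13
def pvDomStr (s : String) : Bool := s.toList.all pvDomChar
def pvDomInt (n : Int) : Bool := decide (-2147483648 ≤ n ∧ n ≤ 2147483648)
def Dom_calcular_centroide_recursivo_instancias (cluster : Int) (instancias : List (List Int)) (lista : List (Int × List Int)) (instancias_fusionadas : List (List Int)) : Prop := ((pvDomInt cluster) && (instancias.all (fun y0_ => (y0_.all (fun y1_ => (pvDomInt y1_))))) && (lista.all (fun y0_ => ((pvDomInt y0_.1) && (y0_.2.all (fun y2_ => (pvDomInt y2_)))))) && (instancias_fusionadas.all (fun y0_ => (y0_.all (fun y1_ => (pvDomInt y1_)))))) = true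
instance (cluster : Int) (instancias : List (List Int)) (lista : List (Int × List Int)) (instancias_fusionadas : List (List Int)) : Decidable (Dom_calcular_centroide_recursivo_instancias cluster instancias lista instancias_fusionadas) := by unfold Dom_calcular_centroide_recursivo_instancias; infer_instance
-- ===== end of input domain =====

-- B replaces A's recursive depth-first walk (lookups and appends interleaved) by two staged
-- passes: an explicit-stack loop collecting the leaf ids left to right, then one pass mapping
-- the ids to instances; equivalence is about the return value (both Pythons also mutate
-- instancias_fusionadas by appending the same instance rows in the same order).

-- ===== PORT A =====
-- dict membership / lookup on the association list: first matching key
def pvLookup (lista : List (Int × List Int)) (c : Int) : Option (List Int) :=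
  (lista.find? (fun p => p.1 == c)).map (fun p => p.2)

-- recursion-depth guard for totality only: under Pre_ the depth is bounded by the rank of the
-- root (< pvFuelA), so the guard is never hit and this is exactly A's recursion
def pvFuelA (lista : List (Int × List Int)) : Nat :=
  (lista.flatMap (fun p => p.2)).length + 2

def pvGoA (instancias : List (List Int)) (lista : List (Int × List Int)) :
    Nat → Int → List (List Int) → List (List Int)
  | 0, _, acc => acc
  | f + 1, c, acc =>
    match pvLookup lista c with
    | some a => a.foldl (fun acc v => pvGoA instancias lista f v acc) acc
    | none =>
      match PySem.List.pyGet? instancias c with   -- instancias[cluster]; none = IndexError, excluded by Pre_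
      | some x => acc ++ [x]
      | none => acc

def calcular_centroide_recursivo_instancias (cluster : Int) (instancias : List (List Int)) (lista : List (Int × List Int)) (instancias_fusionadas : List (List Int)) : List (List Int) :=
  pvGoA instancias lista (pvFuelA lista) cluster instancias_fusionadas

-- ===== PORT B =====
-- loop guard for totality only: each loop step strictly shrinks the stack's total weight
-- (sum of pvBase ^ rank over the stack), which starts below pvFuelB under Pre_
def pvBase (lista : List (Int × List Int)) : Nat :=
  (lista.foldr (fun p m => max p.2.length m) 0) + 2

def pvFuelB (lista : List (Int × List Int)) : Nat :=
  pvBase lista ^ ((lista.flatMap (fun p => p.2)).length + 2)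

-- stage 1 of B: the stack loop collecting leaf ids; top of the stack at the head (the Python
-- pops from the end and pushes the children reversed, which is the same stack step for step)
def pvLeaves (lista : List (Int × List Int)) :
    Nat → List Int → List Int → List Int
  | 0, _, hojas => hojas
  | _ + 1, [], hojas => hojas
  | f + 1, n :: rest, hojas =>
    match PySem.Dict.get? (PySem.Dict.mk lista) n with
    | some a => pvLeaves lista f (a ++ rest) hojas
    | none => pvLeaves lista f rest (hojas ++ [n])

-- stage 2 of B: map the ids to instances ('instancias[h]'; a bad id — IndexError in Python,
-- excluded by Pre_ — contributes nothing here)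
def calcular_centroide_recursivo_instancias_alt (cluster : Int) (instancias : List (List Int)) (lista : List (Int × List Int)) (instancias_fusionadas : List (List Int)) : List (List Int) :=
  instancias_fusionadas ++
    (pvLeaves lista (pvFuelB lista) [cluster] []).flatMap
      (fun h => (PySem.List.pyGet? instancias h).toList)

-- ===== PRECONDITION & SPEC =====
-- children of a node in the merge table (first matching entry; [] for a leaf)
def pvChildren (lista : List (Int × List Int)) (c : Int) : List Int :=
  match lista.find? (fun p => p.1 == c) with
  | some p => p.2
  | none => []

def pvN (lista : List (Int × List Int)) : Nat :=
  (lista.flatMap (fun p => p.2)).length + 1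

-- one closure step of the merge graph, and the set of nodes reachable from c (pvN iterations
-- reach the fixpoint, since every reachable node is c itself or some entry's child)
def pvStep (lista : List (Int × List Int)) (S : Finset Int) : Finset Int :=
  S ∪ S.biUnion (fun x => (pvChildren lista x).toFinset)

def pvReach (lista : List (Int × List Int)) (c : Int) : Finset Int :=
  (pvStep lista)^[pvN lista] {c}

-- Pre_ holds exactly when A returns: the merge graph reachable from cluster is acyclic (a
-- reachable cycle makes A recurse forever — RecursionError) and every reachable leaf id is a
-- valid Python index into instancias (else IndexError). Both are stated on the input graph via
-- its finite reachability closure pvReach, not by running either port.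
def Pre_calcular_centroide_recursivo_instancias (cluster : Int) (instancias : List (List Int)) (lista : List (Int × List Int)) (instancias_fusionadas : List (List Int)) : Prop :=
  ∀ x ∈ pvReach lista cluster,
    (∀ y ∈ pvChildren lista x, x ∉ pvReach lista y) ∧
    ((∀ p ∈ lista, p.1 ≠ x) → PySem.Raise.InRange instancias.length x)
instance (cluster : Int) (instancias : List (List Int)) (lista : List (Int × List Int)) (instancias_fusionadas : List (List Int)) : Decidable (Pre_calcular_centroide_recursivo_instancias cluster instancias lista instancias_fusionadas) := by unfold Pre_calcular_centroide_recursivo_instancias; infer_instance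

def pvWitness_calcular_centroide_recursivo_instancias : Int × List (List Int) × (List (Int × List Int)) × List (List Int) :=
  (3, [[5], [6, 7]], [(3, [2, 0]), (2, [1, 0])], [[9]])

def Spec_calcular_centroide_recursivo_instancias (cluster : Int) (instancias : List (List Int)) (lista : List (Int × List Int)) (instancias_fusionadas : List (List Int)) (out : List (List Int)) : Prop := out = calcular_centroide_recursivo_instancias_alt cluster instancias lista instancias_fusionadas
instance (cluster : Int) (instancias : List (List Int)) (lista : List (Int × List Int)) (instancias_fusionadas : List (List Int)) (out : List (List Int)) : Decidable (Spec_calcular_centroide_recursivo_instancias cluster instancias lista instancias_fusionadas out) := by unfold Spec_calcular_centroide_recursivo_instancias; infer_instance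

-- ===== CLAIM (what is proved, stated in full; the proofs are below) =====
def Claim_equal_calcular_centroide_recursivo_instancias : Prop := ∀ (cluster : Int) (instancias : List (List Int)) (lista : List (Int × List Int)) (instancias_fusionadas : List (List Int)), Dom_calcular_centroide_recursivo_instancias cluster instancias lista instancias_fusionadas → Pre_calcular_centroide_recursivo_instancias cluster instancias lista instancias_fusionadas → Spec_calcular_centroide_recursivo_instancias cluster instancias lista instancias_fusionadas (calcular_centroide_recursivo_instancias cluster instancias lista instancias_fusionadas)

-- ===== LEMMAS AND PROOFS =====

theorem pvWitness_ok :
    Pre_calcular_centroide_recursivo_instancias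
      pvWitness_calcular_centroide_recursivo_instancias.1
      pvWitness_calcular_centroide_recursivo_instancias.2.1
      pvWitness_calcular_centroide_recursivo_instancias.2.2.1
      pvWitness_calcular_centroide_recursivo_instancias.2.2.2 := by decide

-- the two lookups of the two ports agree, and agree with pvChildren
theorem pvDict_get?_eq (lista : List (Int × List Int)) (c : Int) :
    PySem.Dict.get? (PySem.Dict.mk lista) c = pvLookup lista c := by
  induction lista with
  | nil => rfl
  | cons p t ih =>
    rw [PySem.Dict.get?_mk_cons, ih]
    unfold pvLookup
    by_cases h : p.1 = c
    · simp [h]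
    · have : (p.1 == c) = false := by simpa using h
      simp [this]

theorem pvChildren_of_lookup {lista : List (Int × List Int)} {c : Int} {a : List Int}
    (h : pvLookup lista c = some a) : pvChildren lista c = a := by
  unfold pvLookup at h
  unfold pvChildren
  cases hf : lista.find? (fun p => p.1 == c) with
  | none => simp [hf] at h
  | some p => simp [hf] at h ⊢; exact h

-- ----- reachability machinery -----

theorem pvStep_infl (lista : List (Int × List Int)) (S : Finset Int) : S ⊆ pvStep lista S :=
  Finset.subset_union_left

theorem pvStep_mono (lista : List (Int × List Int)) {S T : Finset Int} (h : S ⊆ T) :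
    pvStep lista S ⊆ pvStep lista T :=
  Finset.union_subset_union h (Finset.biUnion_subset_biUnion_of_subset_left _ h)

-- every child value occurs in the flattened children list
theorem pvChildren_subset_flat (lista : List (Int × List Int)) (c : Int) :
    (pvChildren lista c).toFinset ⊆ (lista.flatMap (fun p => p.2)).toFinset := by
  unfold pvChildren
  cases hf : lista.find? (fun p => p.1 == c) with
  | none => simp
  | some p =>
    intro v hv
    simp only [List.mem_toFinset] at hv ⊢
    exact List.mem_flatMap.2 ⟨p, List.mem_of_find?_eq_some hf, hv⟩

theorem pvStep_subset (lista : List (Int × List Int)) (S : Finset Int) :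
    pvStep lista S ⊆ S ∪ (lista.flatMap (fun p => p.2)).toFinset := by
  unfold pvStep
  apply Finset.union_subset Finset.subset_union_left
  apply Finset.Subset.trans (Finset.biUnion_subset.2 (fun x _ => pvChildren_subset_flat lista x))
  exact Finset.subset_union_right

-- a step-closed universe V absorbs iteration to a fixpoint in card V steps
theorem pvFix_aux (lista : List (Int × List Int)) (V : Finset Int)
    (hV : ∀ S : Finset Int, S ⊆ V → pvStep lista S ⊆ V) :
    ∀ n (S : Finset Int), S ⊆ V → V.card ≤ S.card + n →
      pvStep lista ((pvStep lista)^[n] S) = (pvStep lista)^[n] S := by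
  intro n
  induction n with
  | zero =>
    intro S hSV hcard
    have hSV' : S = V := Finset.eq_of_subset_of_card_le hSV (by omega)
    subst hSV'
    simp only [Function.iterate_zero, id_eq]
    exact Finset.Subset.antisymm (hV S Finset.Subset.rfl) (pvStep_infl lista S)
  | succ n ih =>
    intro S hSV hcard
    by_cases hfix : pvStep lista S = S
    · have h1 : (pvStep lista)^[n + 1] S = S := Function.iterate_fixed hfix (n + 1)
      rw [h1, hfix]
    · have hlt : S.card < (pvStep lista S).card :=
        Finset.card_lt_card (Finset.ssubset_iff_subset_ne.2 ⟨pvStep_infl lista S, fun h => hfix h.symm⟩)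
      rw [Function.iterate_succ_apply]
      exact ih (pvStep lista S) (hV S hSV) (by omega)

theorem pvReach_subset (lista : List (Int × List Int)) (c : Int) :
    pvReach lista c ⊆ insert c (lista.flatMap (fun p => p.2)).toFinset := by
  unfold pvReach
  have key : ∀ n, (pvStep lista)^[n] {c} ⊆ insert c (lista.flatMap (fun p => p.2)).toFinset := by
    intro n
    induction n with
    | zero => simp
    | succ n ih =>
      rw [Function.iterate_succ_apply']
      apply Finset.Subset.trans (pvStep_subset lista _)
      apply Finset.union_subset (by exact ih)
      intro v hv; exact Finset.mem_insert_of_mem hv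
  exact key (pvN lista)

def pvRank (lista : List (Int × List Int)) (c : Int) : Nat := (pvReach lista c).card

theorem pvRank_le (lista : List (Int × List Int)) (c : Int) :
    pvRank lista c ≤ pvN lista := by
  unfold pvRank pvN
  calc (pvReach lista c).card
      ≤ (insert c (lista.flatMap (fun p => p.2)).toFinset).card :=
        Finset.card_le_card (pvReach_subset lista c)
    _ ≤ (lista.flatMap (fun p => p.2)).toFinset.card + 1 := Finset.card_insert_le _ _
    _ ≤ (lista.flatMap (fun p => p.2)).length + 1 := by
        have := (lista.flatMap (fun p => p.2)).toFinset_card_le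
        omega

theorem pvReach_fix (lista : List (Int × List Int)) (c : Int) :
    pvStep lista (pvReach lista c) = pvReach lista c := by
  unfold pvReach
  apply pvFix_aux lista (insert c (lista.flatMap (fun p => p.2)).toFinset)
  · intro S hS
    apply Finset.Subset.trans (pvStep_subset lista S)
    apply Finset.union_subset hS
    intro v hv; exact Finset.mem_insert_of_mem hv
  · simp
  · have := (lista.flatMap (fun p => p.2)).toFinset_card_le
    have h1 : ({c} : Finset Int).card = 1 := Finset.card_singleton c
    have h2 := Finset.card_insert_le c (lista.flatMap (fun p => p.2)).toFinset
    unfold pvN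
    omega

theorem pvReach_self (lista : List (Int × List Int)) (c : Int) : c ∈ pvReach lista c := by
  unfold pvReach
  have key : ∀ n, c ∈ (pvStep lista)^[n] ({c} : Finset Int) := by
    intro n
    induction n with
    | zero => simp
    | succ n ih =>
      rw [Function.iterate_succ_apply']
      exact pvStep_infl lista _ ih
  exact key (pvN lista)

-- children of a member of a step-closed set are members
theorem pvMem_children_of_fix {lista : List (Int × List Int)} {F : Finset Int}
    (hfix : pvStep lista F = F) {x : Int} (hx : x ∈ F) {v : Int}
    (hv : v ∈ pvChildren lista x) : v ∈ F := by
  rw [← hfix]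
  unfold pvStep
  apply Finset.mem_union_right
  exact Finset.mem_biUnion.2 ⟨x, hx, List.mem_toFinset.2 hv⟩

-- pvReach v is the least step-closed set containing v
theorem pvReach_least {lista : List (Int × List Int)} {F : Finset Int}
    (hfix : pvStep lista F = F) {v : Int} (hv : v ∈ F) : pvReach lista v ⊆ F := by
  unfold pvReach
  have key : ∀ n, (pvStep lista)^[n] ({v} : Finset Int) ⊆ F := by
    intro n
    induction n with
    | zero => simpa using hv
    | succ n ih =>
      rw [Function.iterate_succ_apply']
      calc pvStep lista ((pvStep lista)^[n] {v}) ⊆ pvStep lista F := pvStep_mono lista ih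
        _ = F := hfix
  exact key (pvN lista)

theorem pvChildren_mem_reach (lista : List (Int × List Int)) {c v : Int}
    (hv : v ∈ pvChildren lista c) : v ∈ pvReach lista c :=
  pvMem_children_of_fix (pvReach_fix lista c) (pvReach_self lista c) hv

-- under acyclicity along R, a child of a member of R has strictly smaller rank
theorem pvRank_child_lt {lista : List (Int × List Int)} {R : Finset Int}
    (hacy : ∀ x ∈ R, ∀ y ∈ pvChildren lista x, x ∉ pvReach lista y)
    {c : Int} (hc : c ∈ R) {v : Int} (hv : v ∈ pvChildren lista c) :
    pvRank lista v < pvRank lista c := by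
  unfold pvRank
  apply Finset.card_lt_card
  constructor
  · exact pvReach_least (pvReach_fix lista c) (pvChildren_mem_reach lista hv)
  · intro hsub
    exact hacy c hc v hv (hsub (pvReach_self lista c))

-- the root reach-set is step-closed, so children of its members stay inside it
theorem pvMem_R_child {lista : List (Int × List Int)} {cluster : Int} {c v : Int}
    (hc : c ∈ pvReach lista cluster) (hv : v ∈ pvChildren lista c) :
    v ∈ pvReach lista cluster :=
  pvMem_children_of_fix (pvReach_fix lista cluster) hc hv

-- ----- fuel stability of A's recursion -----

theorem pvGoA_fuel (instancias : List (List Int)) (lista : List (Int × List Int))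
    (R : Finset Int)
    (hclosed : ∀ c ∈ R, ∀ v ∈ pvChildren lista c, v ∈ R)
    (hacy : ∀ x ∈ R, ∀ y ∈ pvChildren lista x, x ∉ pvReach lista y) :
    ∀ n c, c ∈ R → pvRank lista c = n → ∀ f g acc, n < f → n < g →
      pvGoA instancias lista f c acc = pvGoA instancias lista g c acc := by
  intro n
  induction n using Nat.strong_induction_on with
  | _ n ih =>
    intro c hcR hc f g acc hf hg
    obtain ⟨f', rfl⟩ : ∃ f', f = f' + 1 := ⟨f - 1, by omega⟩
    obtain ⟨g', rfl⟩ : ∃ g', g = g' + 1 := ⟨g - 1, by omega⟩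
    simp only [pvGoA]
    cases hl : pvLookup lista c with
    | none => rfl
    | some a =>
      have ha : pvChildren lista c = a := pvChildren_of_lookup hl
      apply PySem.List.foldl_congr_mem
      intro acc' v hv
      have hvc : v ∈ pvChildren lista c := by rw [ha]; exact hv
      have hlt : pvRank lista v < n := hc ▸ pvRank_child_lt hacy hcR hvc
      exact ih (pvRank lista v) hlt v (hclosed c hcR v hvc) rfl f' g' acc' (by omega) (by omega)

-- ----- the weight of a stack, used as the loop guard's measure -----

def pvW (lista : List (Int × List Int)) (c : Int) : Nat := pvBase lista ^ pvRank lista c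
def pvSW (lista : List (Int × List Int)) (stack : List Int) : Nat :=
  (stack.map (pvW lista)).sum

theorem pvBase_ge_two (lista : List (Int × List Int)) : 2 ≤ pvBase lista := by
  unfold pvBase; omega

theorem pvW_pos (lista : List (Int × List Int)) (c : Int) : 1 ≤ pvW lista c :=
  Nat.one_le_pow _ _ (by have := pvBase_ge_two lista; omega)

theorem pvSW_cons (lista : List (Int × List Int)) (c : Int) (s : List Int) :
    pvSW lista (c :: s) = pvW lista c + pvSW lista s := by
  simp [pvSW]

theorem pvSW_append (lista : List (Int × List Int)) (s t : List Int) :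
    pvSW lista (s ++ t) = pvSW lista s + pvSW lista t := by
  simp [pvSW]

-- children list length bounded by base - 2
theorem pvChildren_le (lista : List (Int × List Int)) {p : Int × List Int} (hp : p ∈ lista) :
    p.2.length + 2 ≤ pvBase lista := by
  unfold pvBase
  have : p.2.length ≤ lista.foldr (fun p m => max p.2.length m) 0 := by
    induction lista with
    | nil => simp at hp
    | cons q t ih =>
      simp only [List.mem_cons] at hp
      simp only [List.foldr_cons]
      rcases hp with rfl | hp
      · omega
      · have := ih hp; omega
  omega

-- key inequality: the whole children list weighs strictly less than the node
theorem pvSW_children_lt {lista : List (Int × List Int)} {R : Finset Int}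
    (hacy : ∀ x ∈ R, ∀ y ∈ pvChildren lista x, x ∉ pvReach lista y)
    {c : Int} (hcR : c ∈ R) {a : List Int} (hl : pvLookup lista c = some a) :
    pvSW lista a + 1 ≤ pvW lista c := by
  have ha : pvChildren lista c = a := pvChildren_of_lookup hl
  have hb := pvBase_ge_two lista
  have hcnt : 1 ≤ pvRank lista c := by
    unfold pvRank
    have := pvReach_self lista c
    exact Finset.card_pos.2 ⟨c, this⟩
  have hchild : ∀ v ∈ a, pvW lista v ≤ pvBase lista ^ (pvRank lista c - 1) := by
    intro v hv
    have := pvRank_child_lt hacy hcR (ha ▸ hv : v ∈ pvChildren lista c)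
    unfold pvW
    exact Nat.pow_le_pow_right (by omega) (by omega)
  have hsum : pvSW lista a ≤ a.length * pvBase lista ^ (pvRank lista c - 1) := by
    unfold pvSW
    have hlen : (a.map (pvW lista)).length = a.length := by simp
    calc (a.map (pvW lista)).sum
        ≤ (a.map (pvW lista)).length * pvBase lista ^ (pvRank lista c - 1) := by
          simpa [smul_eq_mul] using
            List.sum_le_card_nsmul (a.map (pvW lista)) (pvBase lista ^ (pvRank lista c - 1))
              (by intro x hx
                  simp only [List.mem_map] at hx
                  rcases hx with ⟨w, hw, rfl⟩
                  exact hchild w hw)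
      _ = a.length * pvBase lista ^ (pvRank lista c - 1) := by rw [hlen]
  have hlen2 : a.length ≤ pvBase lista - 2 := by
    unfold pvLookup at hl
    cases hf : lista.find? (fun p => p.1 == c) with
    | none => simp [hf] at hl
    | some p =>
      simp [hf] at hl
      subst hl
      have := pvChildren_le lista (List.mem_of_find?_eq_some hf)
      omega
  have hX : 1 ≤ pvBase lista ^ (pvRank lista c - 1) := Nat.one_le_pow _ _ (by omega)
  have h2 : a.length * pvBase lista ^ (pvRank lista c - 1)
      ≤ (pvBase lista - 2) * pvBase lista ^ (pvRank lista c - 1) :=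
    Nat.mul_le_mul_right _ hlen2
  have hb2 : (pvBase lista - 2) * pvBase lista ^ (pvRank lista c - 1)
      + 2 * pvBase lista ^ (pvRank lista c - 1)
      = pvBase lista * pvBase lista ^ (pvRank lista c - 1) := by
    have hsub : pvBase lista - 2 + 2 = pvBase lista := by omega
    rw [← Nat.add_mul, hsub]
  have hWc : pvW lista c = pvBase lista * pvBase lista ^ (pvRank lista c - 1) := by
    unfold pvW
    obtain ⟨k, hk⟩ : ∃ k, pvRank lista c = k + 1 := ⟨pvRank lista c - 1, by omega⟩
    rw [hk, Nat.add_sub_cancel, pow_succ, Nat.mul_comm]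
  rw [hWc]
  omega

-- ----- bridge: B's staged passes compute the left fold of A's recursion over the stack -----

theorem pvBridge (instancias : List (List Int)) (lista : List (Int × List Int))
    (R : Finset Int)
    (hclosed : ∀ c ∈ R, ∀ v ∈ pvChildren lista c, v ∈ R)
    (hacy : ∀ x ∈ R, ∀ y ∈ pvChildren lista x, x ∉ pvReach lista y) :
    ∀ fB stack hojas acc0, (∀ c ∈ stack, c ∈ R) → pvSW lista stack ≤ fB →
      acc0 ++ (pvLeaves lista fB stack hojas).flatMap
          (fun h => (PySem.List.pyGet? instancias h).toList)
      = stack.foldl (fun l c => pvGoA instancias lista (pvFuelA lista) c l)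
          (acc0 ++ hojas.flatMap (fun h => (PySem.List.pyGet? instancias h).toList)) := by
  intro fB
  induction fB with
  | zero =>
    intro stack hojas acc0 hR hw
    cases stack with
    | nil => simp [pvLeaves]
    | cons c rest =>
      exfalso
      have := pvW_pos lista c
      rw [pvSW_cons] at hw
      omega
  | succ f ih =>
    intro stack hojas acc0 hR hw
    cases stack with
    | nil => simp [pvLeaves]
    | cons c rest =>
      rw [pvSW_cons] at hw
      have hcR : c ∈ R := hR c List.mem_cons_self
      have hWc := pvW_pos lista c
      have hA1 : pvFuelA lista = pvN lista + 1 := by unfold pvFuelA pvN; omega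
      simp only [pvLeaves, pvDict_get?_eq, List.foldl_cons]
      cases hl : pvLookup lista c with
      | some a =>
        have ha : pvChildren lista c = a := pvChildren_of_lookup hl
        have hkey := pvSW_children_lt hacy hcR hl
        have hrec : pvSW lista (a ++ rest) ≤ f := by
          rw [pvSW_append]; omega
        have hRrec : ∀ v ∈ a ++ rest, v ∈ R := by
          intro v hv
          rcases List.mem_append.1 hv with hv | hv
          · exact hclosed c hcR v (ha ▸ hv)
          · exact hR v (List.mem_cons_of_mem _ hv)
        have hAstep : ∀ base, pvGoA instancias lista (pvFuelA lista) c base =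
            a.foldl (fun l v => pvGoA instancias lista (pvFuelA lista) v l) base := by
          intro base
          rw [hA1]
          simp only [pvGoA, hl]
          apply PySem.List.foldl_congr_mem
          intro acc' v hv
          have hvc : v ∈ pvChildren lista c := ha ▸ hv
          have hlt : pvRank lista v < pvRank lista c := pvRank_child_lt hacy hcR hvc
          have hle := pvRank_le lista c
          exact pvGoA_fuel instancias lista R hclosed hacy (pvRank lista v) v
            (hclosed c hcR v hvc) rfl (pvN lista) (pvN lista + 1) acc' (by omega) (by omega)
        rw [ih (a ++ rest) hojas acc0 hRrec hrec, List.foldl_append, hAstep]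
      | none =>
        have hrest : pvSW lista rest ≤ f := by omega
        have hRrest : ∀ v ∈ rest, v ∈ R := fun v hv => hR v (List.mem_cons_of_mem _ hv)
        have hAleaf : ∀ base, pvGoA instancias lista (pvFuelA lista) c base =
            base ++ (PySem.List.pyGet? instancias c).toList := by
          intro base
          obtain ⟨f1, hf1⟩ : ∃ f1, pvFuelA lista = f1 + 1 := ⟨pvFuelA lista - 1, by unfold pvFuelA; omega⟩
          rw [hf1]
          simp only [pvGoA, hl]
          cases PySem.List.pyGet? instancias c <;> simp
        rw [ih rest (hojas ++ [c]) acc0 hRrest hrest, hAleaf]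
        simp

-- ===== VERDICT (by name: the statement is the Claim_ definition above) =====
theorem calcular_centroide_recursivo_instancias_spec : Claim_equal_calcular_centroide_recursivo_instancias := by
  intro cluster instancias lista acc _hDom hPre
  unfold Spec_calcular_centroide_recursivo_instancias
  unfold calcular_centroide_recursivo_instancias calcular_centroide_recursivo_instancias_alt
  have hacy : ∀ x ∈ pvReach lista cluster, ∀ y ∈ pvChildren lista x, x ∉ pvReach lista y :=
    fun x hx => (hPre x hx).1
  have hclosed : ∀ c ∈ pvReach lista cluster, ∀ v ∈ pvChildren lista c, v ∈ pvReach lista cluster :=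
    fun c hc v hv => pvMem_R_child hc hv
  have hfuel : pvSW lista [cluster] ≤ pvFuelB lista := by
    unfold pvSW pvW pvFuelB
    simp only [List.map_cons, List.map_nil, List.sum_cons, List.sum_nil, Nat.add_zero]
    have h1 := pvRank_le lista cluster
    apply Nat.pow_le_pow_right (by have := pvBase_ge_two lista; omega)
    unfold pvN at h1
    omega
  have hstack : ∀ c ∈ [cluster], c ∈ pvReach lista cluster := by
    intro c hc
    simp at hc
    subst hc
    exact pvReach_self lista _
  have := pvBridge instancias lista (pvReach lista cluster) hclosed hacy
    (pvFuelB lista) [cluster] [] acc hstack hfuel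
  simp only [List.flatMap_nil, List.append_nil, List.foldl_cons, List.foldl_nil] at this
  exact this.symm
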